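-- pv_equiv track=rewrite | github.com/CharlieRider/project_euler | problem5/problem5.py | largest_divisors
-- ===== SOURCE A (Python) =====
-- def largest_divisors(n):
--     possible_large_divisors = list(range(1, n+1))
--     for i in range(n, 0, -1):
--         if i in possible_large_divisors:
--             for j in range(1, i):
--                 if i %j == 0:
--                     if j in possible_large_divisors:
--                         possible_large_divisors.remove(j)
--     return possible_large_divisors
-- ===== SOURCE B (Python) =====
-- def largest_divisors(n):
--     # Survivors of A's sieve are exactly the numbers in (n//2, n]: every
--     # m <= n//2 properly divides its largest multiple <= n (which exceeds n//2
--     # and therefore survives), while no m > n//2 has a proper multiple <= n.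
--     return list(range(n // 2 + 1, n + 1))
-- ===== Notes on version B (the rewrite author's own statement) =====
-- stated objective: faster
-- what changed: Replaces the triple-nested sieve (for each i, scan and remove all proper divisors of surviving i) by the closed form range(n//2+1, n+1), proved equal: the survivors are exactly the integers strictly above n//2.
import Mathlib
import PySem

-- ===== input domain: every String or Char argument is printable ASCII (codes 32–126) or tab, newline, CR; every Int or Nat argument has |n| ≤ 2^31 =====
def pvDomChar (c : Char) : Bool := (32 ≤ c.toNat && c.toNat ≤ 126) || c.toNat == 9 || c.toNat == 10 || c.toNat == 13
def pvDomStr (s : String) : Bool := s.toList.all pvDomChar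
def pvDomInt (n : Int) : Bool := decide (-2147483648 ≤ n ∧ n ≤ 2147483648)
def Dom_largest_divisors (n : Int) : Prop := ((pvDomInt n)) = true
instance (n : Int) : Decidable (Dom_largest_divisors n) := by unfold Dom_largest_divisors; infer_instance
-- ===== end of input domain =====

-- B replaces A's triple-nested divisor sieve by the closed form range(n//2+1, n+1); proved equal for every n.

-- ===== PORT A =====
-- literal transliteration of A: build [1..n], then for i = n..1, if i still
-- present, remove every proper divisor j of i that is still present.
-- list.remove is guarded by the membership test, so remove? is always some;
-- .getD only supplies the (unreachable) fallback.
def largest_divisors (n : Int) : List Int :=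
  (PySem.List.pyRange n 0 (-1)).foldl (fun lst i =>
    if lst.contains i then
      (PySem.List.pyRange 1 i 1).foldl (fun l2 j =>
        if PySem.Int.mod i j == 0 then
          if l2.contains j then ((PySem.List.remove? l2 j).getD l2) else l2
        else l2) lst
    else lst) (PySem.List.pyRange 1 (n+1) 1)

-- ===== PORT B =====
def largest_divisors_alt (n : Int) : List Int :=
  PySem.List.pyRange (PySem.Int.floordiv n 2 + 1) (n + 1) 1

-- ===== PRECONDITION & SPEC =====
def Spec_largest_divisors (n : Int) (out : List Int) : Prop := out = largest_divisors_alt n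
instance (n : Int) (out : List Int) : Decidable (Spec_largest_divisors n out) := by unfold Spec_largest_divisors; infer_instance

-- ===== CLAIM (what is proved, stated in full; the proofs are below) =====
def Claim_equal_largest_divisors : Prop := ∀ (n : Int), Dom_largest_divisors n → Spec_largest_divisors n (largest_divisors n)

-- ===== LEMMAS AND PROOFS =====

-- the inner-loop body of A (for fixed i = t)
def pvG (t : Int) : List Int → Int → List Int := fun l2 j =>
  if PySem.Int.mod t j == 0 then
    if l2.contains j then ((PySem.List.remove? l2 j).getD l2) else l2
  else l2

-- the outer-loop body of A
def pvF : List Int → Int → List Int := fun lst i =>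
  if lst.contains i then (PySem.List.pyRange 1 i 1).foldl (pvG i) lst else lst

theorem largest_divisors_eq_fold (n : Int) :
    largest_divisors n =
      (PySem.List.pyRange n 0 (-1)).foldl pvF (PySem.List.pyRange 1 (n+1) 1) := rfl

-- largest multiple of m that is ≤ n (for 1 ≤ m ≤ n)
def pvM (n m : Int) : Int := m * (n / m)

-- state of A's list after all i > t have been processed
def pvS (n t : Int) : List Int :=
  (PySem.List.pyRange 1 (n+1) 1).filter (fun m => decide (n/2 < m ∨ pvM n m ≤ t))

-- state during the inner loop at i = t, after j = 1..k-1 have been processed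
def pvT (n t k : Int) : List Int :=
  (PySem.List.pyRange 1 (n+1) 1).filter
    (fun m => decide ((n/2 < m ∨ pvM n m ≤ t) ∧ ¬(m < k ∧ m ∣ t)))

theorem pvM_eq (n m : Int) : pvM n m = n - n % m := by
  unfold pvM
  have := Int.mul_ediv_add_emod n m
  omega

theorem pvM_bounds (n m : Int) (hm : 1 ≤ m) : n - m < pvM n m ∧ pvM n m ≤ n := by
  rw [pvM_eq n m]
  have h1 : 0 ≤ n % m := Int.emod_nonneg n (by omega)
  have h2 : n % m < m := Int.emod_lt_of_pos n (by omega)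
  omega

theorem dvd_pvM (n m : Int) : m ∣ pvM n m := dvd_mul_right m (n / m)

theorem le_pvM_of_dvd (n m t : Int) (hm : 1 ≤ m) (hd : m ∣ t) (ht : t ≤ n) :
    t ≤ pvM n m := by
  obtain ⟨c, rfl⟩ := hd
  have hc : c ≤ n / m := by
    rw [Int.le_ediv_iff_mul_le (by omega : (0:Int) < m)]
    have : c * m = m * c := mul_comm c m
    omega
  exact mul_le_mul_of_nonneg_left hc (by omega)

theorem half_facts (n : Int) : n = 2 * (n / 2) + n % 2 ∧ 0 ≤ n % 2 ∧ n % 2 < 2 :=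
  ⟨by have := Int.mul_ediv_add_emod n 2; omega, Int.emod_nonneg n (by omega),
   Int.emod_lt_of_pos n (by omega)⟩

theorem pvT_nodup (n t k : Int) : (pvT n t k).Nodup :=
  (PySem.List.nodup_pyRange_one 1 (n+1)).filter _

-- one inner-loop step: processing j = k turns pvT … k into pvT … (k+1)
theorem inner_step (n t k : Int) (hk1 : 1 ≤ k) (hkt : k < t) (htn : t ≤ n) :
    pvG t (pvT n t k) k = pvT n t (k+1) := by
  have hh := half_facts n
  have hmod : PySem.Int.mod t k = t % k := PySem.Int.mod_eq_emod_of_pos (by omega)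
  by_cases hd : k ∣ t
  · have hz : t % k = 0 := Int.emod_eq_zero_of_dvd hd
    unfold pvG
    rw [hmod, hz]
    simp only [beq_self_eq_true, if_true]
    by_cases hc : k ∈ pvT n t k
    · have hct : (pvT n t k).contains k = true := List.contains_iff_mem.mpr hc
      rw [hct, if_pos rfl, PySem.List.remove?_eq_some_erase (pvT n t k) k hc, Option.getD_some,
        (pvT_nodup n t k).erase_eq_filter k]
      unfold pvT
      rw [List.filter_filter]
      refine List.filter_congr ?_
      intro m hm
      rw [PySem.List.mem_pyRange_one] at hm
      by_cases hmk : m = k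
      · subst hmk
        simp only [bne_self_eq_false, Bool.false_and]
        symm
        rw [decide_eq_false_iff_not]
        rintro ⟨_, hcon⟩
        exact hcon ⟨by omega, hd⟩
      · have hbne : (m != k) = true := bne_iff_ne.mpr hmk
        rw [hbne, Bool.true_and, decide_eq_decide]
        constructor
        · rintro ⟨hb, hnk⟩
          exact ⟨hb, by intro h; exact hnk ⟨by omega, h.2⟩⟩
        · rintro ⟨hb, hnk⟩
          exact ⟨hb, by intro h; exact hnk ⟨by omega, h.2⟩⟩
    · have : (pvT n t k).contains k = false := by
        simp [List.contains_eq_mem, hc]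
      rw [this]
      simp only [Bool.false_eq_true, if_false]
      -- k is not in the list: its base predicate is false, so nothing changes
      have hbase : ¬ ((n/2 < k ∨ pvM n k ≤ t) ∧ ¬(k < k ∧ k ∣ t)) := by
        intro h
        apply hc
        unfold pvT
        rw [List.mem_filter, PySem.List.mem_pyRange_one]
        exact ⟨⟨by omega, by omega⟩, by simpa using h⟩
      unfold pvT
      refine List.filter_congr ?_
      intro m hm
      rw [PySem.List.mem_pyRange_one] at hm
      by_cases hmk : m = k
      · subst hmk
        simp only [decide_eq_decide]
        constructor
        · intro h; exact absurd h hbase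
        · intro ⟨hb, hnk⟩
          exact absurd ⟨hb, by intro ⟨h1, h2⟩; exact hnk ⟨by omega, h2⟩⟩ hbase
      · simp only [decide_eq_decide]
        constructor
        · rintro ⟨hb, hnk⟩
          exact ⟨hb, by intro ⟨h1, h2⟩; exact hnk ⟨by omega, h2⟩⟩
        · rintro ⟨hb, hnk⟩
          exact ⟨hb, by intro ⟨h1, h2⟩; exact hnk ⟨by omega, h2⟩⟩
  · have hz : t % k ≠ 0 := fun h => hd (Int.dvd_of_emod_eq_zero h)
    unfold pvG
    rw [hmod]
    simp only [beq_iff_eq, hz, if_false]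
    unfold pvT
    refine List.filter_congr ?_
    intro m hm
    rw [PySem.List.mem_pyRange_one] at hm
    simp only [decide_eq_decide]
    by_cases hmk : m = k
    · subst hmk
      constructor
      · rintro ⟨hb, _⟩; exact ⟨hb, by intro ⟨_, h2⟩; exact hd h2⟩
      · rintro ⟨hb, _⟩; exact ⟨hb, by intro ⟨h1, _⟩; omega⟩
    · constructor
      · rintro ⟨hb, hnk⟩; exact ⟨hb, by intro ⟨h1, h2⟩; exact hnk ⟨by omega, h2⟩⟩
      · rintro ⟨hb, hnk⟩; exact ⟨hb, by intro ⟨h1, h2⟩; exact hnk ⟨by omega, h2⟩⟩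

-- the whole inner loop, by induction on the number of remaining j's
theorem inner_fold (n t : Int) (htn : t ≤ n) :
    ∀ (c : Nat) (k : Int), 1 ≤ k → k + c = t →
      (PySem.List.pyRange k t 1).foldl (pvG t) (pvT n t k) = pvT n t t := by
  intro c
  induction c with
  | zero =>
    intro k hk1 hkc
    have hkt : k = t := by omega
    rw [PySem.List.pyRange_one_eq_nil (by omega), List.foldl_nil, hkt]
  | succ c ih =>
    intro k hk1 hkc
    have hkt : k < t := by omega
    rw [PySem.List.pyRange_one_cons hkt, List.foldl_cons, inner_step n t k hk1 hkt htn]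
    exact ih (k+1) (by omega) (by omega)

-- one outer-loop step: processing i = t turns pvS … t into pvS … (t-1)
theorem outer_step (n t : Int) (ht1 : 1 ≤ t) (htn : t ≤ n) :
    pvF (pvS n t) t = pvS n (t-1) := by
  have hh := half_facts n
  by_cases hth : n/2 < t
  · -- t survives; the inner loop removes exactly the m with pvM n m = t
    have hmem : t ∈ pvS n t := by
      unfold pvS
      rw [List.mem_filter, PySem.List.mem_pyRange_one]
      exact ⟨⟨by omega, by omega⟩, by simp [hth]⟩
    unfold pvF
    rw [List.contains_iff_mem.mpr hmem, if_pos rfl]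
    have hinit : pvS n t = pvT n t 1 := by
      unfold pvS pvT
      refine List.filter_congr ?_
      intro m hm
      rw [PySem.List.mem_pyRange_one] at hm
      simp only [decide_eq_decide]
      constructor
      · intro hb; exact ⟨hb, by intro ⟨h1, _⟩; omega⟩
      · rintro ⟨hb, _⟩; exact hb
    rw [hinit, inner_fold n t htn (t-1).toNat 1 (le_refl 1) (by omega)]
    unfold pvT pvS
    refine List.filter_congr ?_
    intro m hm
    rw [PySem.List.mem_pyRange_one] at hm
    have hmb := pvM_bounds n m (by omega)
    simp only [decide_eq_decide]
    by_cases hd : m ∣ t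
    · rcases lt_trichotomy m t with hmt | hmt | hmt
      · -- m a proper divisor of t: removed, and pvM n m = t keeps RHS false
        have h2m : 2 * m ≤ t := by
          obtain ⟨c, rfl⟩ := hd
          have hc : 2 ≤ c := by nlinarith
          nlinarith
        have hge : t ≤ pvM n m := le_pvM_of_dvd n m t (by omega) hd htn
        constructor
        · rintro ⟨_, hnk⟩; exact absurd ⟨hmt, hd⟩ hnk
        · intro hb; omega
      · subst hmt
        constructor
        · intro _; left; exact hth
        · intro _; exact ⟨Or.inl hth, by intro ⟨h1, _⟩; omega⟩
      · exact absurd (Int.le_of_dvd (by omega) hd) (by omega)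
    · -- m does not divide t, so pvM n m ≠ t and nothing changes for m
      have hne : pvM n m ≠ t := fun h => hd (h ▸ dvd_pvM n m)
      constructor
      · rintro ⟨hb, _⟩; rcases hb with hb | hb
        · exact Or.inl hb
        · right; omega
      · intro hb
        refine ⟨?_, by intro ⟨_, h2⟩; exact hd h2⟩
        rcases hb with hb | hb
        · exact Or.inl hb
        · right; omega
  · -- t ≤ n/2: t was already removed, the step is a no-op
    have hnot : t ∉ pvS n t := by
      unfold pvS
      rw [List.mem_filter]
      rintro ⟨_, hp⟩
      rw [decide_eq_true_eq] at hp
      have hmb := pvM_bounds n t (by omega)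
      omega
    unfold pvF
    have hct : (pvS n t).contains t = false := by
      rw [Bool.eq_false_iff]; intro h; exact hnot (List.contains_iff_mem.mp h)
    rw [hct]
    simp only [Bool.false_eq_true, if_false]
    unfold pvS
    refine List.filter_congr ?_
    intro m hm
    rw [PySem.List.mem_pyRange_one] at hm
    simp only [decide_eq_decide]
    by_cases hmh : n/2 < m
    · simp [hmh]
    · have hmb := pvM_bounds n m (by omega)
      constructor
      · intro hb; right; omega
      · intro hb; right; omega

-- the whole outer loop
theorem outer_fold (n : Int) : ∀ (c : Nat), (c : Int) ≤ n →
    (PySem.List.pyRange c 0 (-1)).foldl pvF (pvS n c) = pvS n 0 := by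
  intro c
  induction c with
  | zero => intro _; rw [PySem.List.pyRange_neg_one_eq_nil (by omega)]; rfl
  | succ c ih =>
    intro hc
    rw [PySem.List.pyRange_neg_one_cons (by
      push_cast; omega : (0:Int) < ((c:Nat)+1 : Nat)), List.foldl_cons]
    have hstep := outer_step n ((c:Int)+1) (by omega) (by push_cast at hc ⊢; omega)
    push_cast
    rw [hstep]
    have : ((c:Int) + 1 - 1) = (c:Int) := by omega
    rw [this]
    exact ih (by push_cast at hc ⊢; omega)

theorem floordiv_two (n : Int) : PySem.Int.floordiv n 2 = n / 2 :=
  PySem.Int.floordiv_eq_ediv_of_pos (by omega)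

theorem main_eq (n : Int) : largest_divisors n = largest_divisors_alt n := by
  unfold largest_divisors_alt
  rw [floordiv_two, largest_divisors_eq_fold]
  have hh := half_facts n
  rcases (by omega : n ≤ 0 ∨ 0 < n) with hn | hn
  · rw [PySem.List.pyRange_neg_one_eq_nil hn, List.foldl_nil,
      PySem.List.pyRange_one_eq_nil (by omega), PySem.List.pyRange_one_eq_nil (by omega)]
  · -- n ≥ 1
    have hinit : PySem.List.pyRange 1 (n+1) 1 = pvS n n := by
      unfold pvS
      symm
      apply List.filter_eq_self.mpr
      intro m hm
      rw [PySem.List.mem_pyRange_one] at hm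
      have hmb := pvM_bounds n m (by omega)
      simp only [decide_eq_true_eq]
      right; omega
    rw [hinit]
    have hcast : ((n.toNat : Nat) : Int) = n := Int.toNat_of_nonneg (by omega)
    have hfold := outer_fold n n.toNat (by omega)
    rw [hcast] at hfold
    rw [hfold]
    -- pvS n 0 = range(n/2+1, n+1)
    unfold pvS
    rw [PySem.List.pyRange_one_append 1 (n/2+1) (n+1) (by omega) (by omega),
      List.filter_append]
    have hleft : (PySem.List.pyRange 1 (n/2+1) 1).filter
        (fun m => decide (n/2 < m ∨ pvM n m ≤ 0)) = [] := by
      apply List.filter_eq_nil_iff.mpr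
      intro m hm
      rw [PySem.List.mem_pyRange_one] at hm
      have hmb := pvM_bounds n m (by omega)
      simp only [decide_eq_true_eq]
      omega
    have hright : (PySem.List.pyRange (n/2+1) (n+1) 1).filter
        (fun m => decide (n/2 < m ∨ pvM n m ≤ 0)) = PySem.List.pyRange (n/2+1) (n+1) 1 := by
      apply List.filter_eq_self.mpr
      intro m hm
      rw [PySem.List.mem_pyRange_one] at hm
      simp only [decide_eq_true_eq]
      left; omega
    rw [hleft, hright, List.nil_append]

-- ===== VERDICT (by name: the statement is the Claim_ definition above) =====
theorem largest_divisors_spec : Claim_equal_largest_divisors := by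
  intro n _
  exact main_eq n
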